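-- pv_equiv track=rewrite | github.com/xjtu-omics/opium_poppy_isoseq | ttlib/stringBase.py | removePolyAT
-- ===== SOURCE A (Python) =====
-- def removePolyAT(seq):
--     window = 10
--     nst = -1
--     cutP = 0.8
--     ned = -1
--     seqLen = len(seq)
--     atNum = 0
--     for i in range(seqLen):
--         if seq[i]=='A' or seq[i]=='T' or \
--            seq[i]=='a' or seq[i]=='t':
--             atNum = atNum+1
--         if i>=window:
--             np = i-window
--             if seq[np]=='A' or seq[np]=='T' or \
--                 seq[np]=='a' or seq[np]=='t':
--                 atNum = atNum-1
--             if atNum < window*cutP: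
--                 nst = i
--                 break
--     if nst==-1:
--         return None
--
--     i = seqLen-1
--     j = 0
--     atNum = 0
--     while i>=0:
--         if seq[i]=='A' or seq[i]=='T' or \
--            seq[i]=='a' or seq[i]=='t':
--             atNum = atNum+1
--         if j>=window:
--             np = i+window
--             if seq[np] == 'A' or seq[np] == 'T' or \
--                seq[np] == 'a' or seq[np] == 't':
--                 atNum = atNum - 1
--             if atNum < window * cutP:
--                 ned = i+1
--                 break
--         j = j+1
--         i = i-1
--     if ned==-1:
--         return None
--
--     return seq[nst:ned]
-- ===== SOURCE B (Python) =====
-- def removePolyAT(seq):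
--     window = 10
--     thresh = window * 0.8
--     n = len(seq)
--     # prefix counts: pre[k] = number of A/T/a/t characters among seq[:k]
--     pre = [0] * (n + 1)
--     for k in range(n):
--         pre[k + 1] = pre[k] + (seq[k] in 'ATat')
--     nst = None
--     for i in range(window, n):
--         if pre[i + 1] - pre[i - window + 1] < thresh:
--             nst = i
--             break
--     if nst is None:
--         return None
--     ned = None
--     for i in range(n - 1 - window, -1, -1):
--         if pre[i + window] - pre[i] < thresh:
--             ned = i + 1
--             break
--     if ned is None:
--         return None
--     return seq[nst:ned]
-- ===== Notes on version B (the rewrite author's own statement) =====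
-- stated objective: alternative
-- what changed: Replaces A's two stateful sliding-window loops (a running AT counter incremented/decremented with a break) by a prefix-count array built once, after which each cut point is found by a plain index scan comparing two prefix-sum differences.
import Mathlib
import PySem

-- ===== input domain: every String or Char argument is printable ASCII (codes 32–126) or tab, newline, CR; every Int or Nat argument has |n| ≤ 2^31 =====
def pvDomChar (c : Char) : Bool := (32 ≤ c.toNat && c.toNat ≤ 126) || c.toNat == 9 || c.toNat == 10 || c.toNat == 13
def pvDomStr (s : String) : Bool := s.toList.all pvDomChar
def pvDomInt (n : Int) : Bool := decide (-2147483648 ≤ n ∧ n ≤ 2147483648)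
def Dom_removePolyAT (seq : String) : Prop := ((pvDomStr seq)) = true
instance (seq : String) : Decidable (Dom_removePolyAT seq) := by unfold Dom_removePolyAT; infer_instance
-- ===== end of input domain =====

-- B replaces A's two stateful sliding-window loops by a prefix-count array plus two plain index scans; same O(n) cost, alternative structure.

-- ===== PORT A =====
def pvIsAT (c : Char) : Bool := c == 'A' || c == 'T' || c == 'a' || c == 't'

-- A's forward for-loop with break: state (i, atNum); atNum<8.0 ↔ atNum<8 on integers (exact)
def pvFwdA (l : List Char) (n : Nat) (i : Nat) (atNum : Int) : Option Nat :=
  if _h : i < n then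
    let a1 := if pvIsAT (l.getD i ' ') then atNum + 1 else atNum
    if 10 ≤ i then
      let a2 := if pvIsAT (l.getD (i - 10) ' ') then a1 - 1 else a1
      if a2 < 8 then some i else pvFwdA l n (i + 1) a2
    else pvFwdA l n (i + 1) a1
  else none
  termination_by n - i

-- A's backward while-loop: state (i, j, atNum); i may reach -1
def pvBwdA (l : List Char) (i : Int) (j : Nat) (atNum : Int) : Option Int :=
  if _h : 0 ≤ i then
    let a1 := if pvIsAT (l.getD i.toNat ' ') then atNum + 1 else atNum
    if 10 ≤ j then
      let a2 := if pvIsAT (l.getD (i + 10).toNat ' ') then a1 - 1 else a1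
      if a2 < 8 then some (i + 1) else pvBwdA l (i - 1) (j + 1) a2
    else pvBwdA l (i - 1) (j + 1) a1
  else none
  termination_by (i + 1).toNat
  decreasing_by all_goals omega

def removePolyAT (seq : String) : Option String :=
  let l := seq.toList
  let n := l.length
  match pvFwdA l n 0 0 with
  | none => none
  | some nst =>
    match pvBwdA l ((n : Int) - 1) 0 0 with
    | none => none
    | some ned => some (PySem.Str.slice seq (some (nst : Int)) (some ned))

-- ===== PORT B =====
-- prefix-count list: (pvPreB a l) !k = a + #AT in l[:k]  (Python: pre[k+1] = pre[k] + (seq[k] in 'ATat'))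
def pvPreB (a : Int) : List Char → List Int
  | [] => [a]
  | c :: rest => a :: pvPreB (a + if "ATat".toList.contains c then 1 else 0) rest

-- left scan: first i in [10, n) with pre[i+1] - pre[i-9] < 8.0
def pvLeftB (pre : List Int) (n : Nat) (i : Nat) : Option Nat :=
  if _h : i < n then
    if pre.getD (i + 1) 0 - pre.getD (i - 9) 0 < 8 then some i else pvLeftB pre n (i + 1)
  else none
  termination_by n - i

-- right scan: first i from n-11 down to 0 with pre[i+10] - pre[i] < 8.0
def pvRightB (pre : List Int) (i : Int) : Option Int :=
  if _h : 0 ≤ i then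
    if pre.getD (i + 10).toNat 0 - pre.getD i.toNat 0 < 8 then some (i + 1) else pvRightB pre (i - 1)
  else none
  termination_by (i + 1).toNat
  decreasing_by all_goals omega

def removePolyAT_alt (seq : String) : Option String :=
  let l := seq.toList
  let n := l.length
  let pre := pvPreB 0 l
  match pvLeftB pre n 10 with
  | none => none
  | some nst =>
    match pvRightB pre ((n : Int) - 1 - 10) with
    | none => none
    | some ned => some (PySem.Str.slice seq (some (nst : Int)) (some ned))

-- ===== PRECONDITION & SPEC =====
def Spec_removePolyAT (seq : String) (out : Option String) : Prop := out = removePolyAT_alt seq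
instance (seq : String) (out : Option String) : Decidable (Spec_removePolyAT seq out) := by unfold Spec_removePolyAT; infer_instance

-- ===== CLAIM (what is proved, stated in full; the proofs are below) =====
def Claim_equal_removePolyAT : Prop := ∀ (seq : String), Dom_removePolyAT seq → Spec_removePolyAT seq (removePolyAT seq)

-- ===== LEMMAS AND PROOFS =====

-- step characterizations of the four loops
theorem pvFwdA_step (l : List Char) (n i : Nat) (x : Int) (h : i < n) (hi : 10 ≤ i) :
    pvFwdA l n i x =
      if x + (if pvIsAT (l.getD i ' ') then (1:Int) else 0)
          - (if pvIsAT (l.getD (i - 10) ' ') then (1:Int) else 0) < 8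
      then some i
      else pvFwdA l n (i + 1)
        (x + (if pvIsAT (l.getD i ' ') then (1:Int) else 0)
           - (if pvIsAT (l.getD (i - 10) ' ') then (1:Int) else 0)) := by
  rw [pvFwdA]
  simp only [dif_pos h, if_pos hi]
  split_ifs <;> first | rfl | (congr 1; omega)

theorem pvFwdA_early (l : List Char) (n i : Nat) (x : Int) (h : i < n) (hi : ¬ 10 ≤ i) :
    pvFwdA l n i x = pvFwdA l n (i + 1) (x + (if pvIsAT (l.getD i ' ') then (1:Int) else 0)) := by
  rw [pvFwdA]
  simp only [dif_pos h, if_neg hi]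
  split_ifs <;> first | rfl | (congr 1; omega)

theorem pvFwdA_stop (l : List Char) (n i : Nat) (x : Int) (h : ¬ i < n) :
    pvFwdA l n i x = none := by
  rw [pvFwdA]; simp [h]

theorem pvBwdA_step (l : List Char) (i : Int) (j : Nat) (x : Int) (h : 0 ≤ i) (hj : 10 ≤ j) :
    pvBwdA l i j x =
      if x + (if pvIsAT (l.getD i.toNat ' ') then (1:Int) else 0)
          - (if pvIsAT (l.getD (i + 10).toNat ' ') then (1:Int) else 0) < 8
      then some (i + 1)
      else pvBwdA l (i - 1) (j + 1)
        (x + (if pvIsAT (l.getD i.toNat ' ') then (1:Int) else 0)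
           - (if pvIsAT (l.getD (i + 10).toNat ' ') then (1:Int) else 0)) := by
  rw [pvBwdA]
  simp only [dif_pos h, if_pos hj]
  split_ifs <;> first | rfl | (congr 1; omega)

theorem pvBwdA_early (l : List Char) (i : Int) (j : Nat) (x : Int) (h : 0 ≤ i) (hj : ¬ 10 ≤ j) :
    pvBwdA l i j x = pvBwdA l (i - 1) (j + 1) (x + (if pvIsAT (l.getD i.toNat ' ') then (1:Int) else 0)) := by
  rw [pvBwdA]
  simp only [dif_pos h, if_neg hj]
  split_ifs <;> first | rfl | (congr 1; omega)

theorem pvBwdA_stop (l : List Char) (i : Int) (j : Nat) (x : Int) (h : ¬ 0 ≤ i) :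
    pvBwdA l i j x = none := by
  rw [pvBwdA]; simp [h]

-- prefix count of AT chars among the first k characters
def pvPN (l : List Char) (k : Nat) : Int := ((l.take k).countP pvIsAT : Int)

theorem pvInATat_eq (c : Char) : ("ATat".toList.contains c) = pvIsAT c := by
  have h : "ATat".toList = ['A', 'T', 'a', 't'] := by decide
  rw [h]
  by_cases h1 : c = 'A' <;> by_cases h2 : c = 'T' <;> by_cases h3 : c = 'a' <;> by_cases h4 : c = 't' <;>
    simp [pvIsAT, h1, h2, h3, h4]

theorem pvPN_succ (l : List Char) (k : Nat) (hk : k < l.length) :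
    pvPN l (k + 1) = pvPN l k + (if pvIsAT (l.getD k ' ') then 1 else 0) := by
  have h1 : l.take (k + 1) = l.take k ++ [l[k]] := by
    rw [List.take_succ, List.getElem?_eq_getElem hk]
    rfl
  have h2 : l.getD k ' ' = l[k] := by
    simp [List.getD_eq_getElem?_getD, List.getElem?_eq_getElem hk]
  rw [pvPN, pvPN, h1, h2, List.countP_append]
  simp only [List.countP_cons, List.countP_nil]
  split_ifs <;> push_cast <;> ring

theorem pvPre_getD (l : List Char) : ∀ (k : Nat) (a : Int), k ≤ l.length →
    (pvPreB a l).getD k 0 = a + pvPN l k := by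
  induction l with
  | nil =>
    intro k a hk
    have hk0 : k = 0 := by simpa using hk
    subst hk0
    simp [pvPreB, pvPN]
  | cons c rest ih =>
    intro k a hk
    cases k with
    | zero => simp [pvPreB, pvPN]
    | succ k =>
      simp only [pvPreB, List.getD_cons_succ]
      rw [ih k _ (by simpa using hk)]
      simp only [pvPN, List.take_succ_cons, List.countP_cons, pvInATat_eq]
      split_ifs <;> push_cast <;> ring

theorem pvPre_getD0 (l : List Char) (k : Nat) (hk : k ≤ l.length) :
    (pvPreB 0 l).getD k 0 = pvPN l k := by
  have := pvPre_getD l k 0 hk; omega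

theorem pvFwd2 (l : List Char) : ∀ (i : Nat), 10 ≤ i →
    pvFwdA l l.length i (pvPN l i - pvPN l (i - 10)) = pvLeftB (pvPreB 0 l) l.length i := by
  have main : ∀ (m i : Nat), l.length ≤ i + m → 10 ≤ i →
      pvFwdA l l.length i (pvPN l i - pvPN l (i - 10)) = pvLeftB (pvPreB 0 l) l.length i := by
    intro m
    induction m with
    | zero =>
      intro i hm hi
      rw [pvFwdA_stop _ _ _ _ (by omega), pvLeftB, dif_neg (by omega)]
    | succ m ih =>
      intro i hm hi
      by_cases h : i < l.length
      · rw [pvFwdA_step l l.length i _ h hi, pvLeftB, dif_pos h]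
        have hA := pvPN_succ l i h
        have hB := pvPN_succ l (i - 10) (by omega)
        have e9 : i - 10 + 1 = i - 9 := by omega
        rw [e9] at hB
        have hp1 : (pvPreB 0 l).getD (i + 1) 0 = pvPN l (i + 1) := pvPre_getD0 l _ (by omega)
        have hp9 : (pvPreB 0 l).getD (i - 9) 0 = pvPN l (i - 9) := pvPre_getD0 l _ (by omega)
        rw [hp1, hp9]
        have key : pvPN l i - pvPN l (i - 10) + (if pvIsAT (l.getD i ' ') then (1:Int) else 0)
            - (if pvIsAT (l.getD (i - 10) ' ') then (1:Int) else 0)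
            = pvPN l (i + 1) - pvPN l (i - 9) := by
          split_ifs at hA hB ⊢ <;> omega
        rw [key]
        by_cases hc : pvPN l (i + 1) - pvPN l (i - 9) < 8
        · rw [if_pos hc, if_pos hc]
        · rw [if_neg hc, if_neg hc]
          have e10 : i + 1 - 10 = i - 9 := by omega
          have h2 := ih (i + 1) (by omega) (by omega)
          rw [e10] at h2
          exact h2
      · rw [pvFwdA_stop _ _ _ _ h, pvLeftB, dif_neg h]
  intro i hi
  exact main l.length i (by omega) hi

theorem pvFwd1_ten (l : List Char) :
    pvFwdA l l.length 10 (pvPN l 10) = pvLeftB (pvPreB 0 l) l.length 10 := by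
  have h0 : pvPN l 0 = 0 := by simp [pvPN]
  have := pvFwd2 l 10 le_rfl
  simpa [h0] using this

theorem pvFwd1 (l : List Char) : ∀ (i : Nat), i ≤ 10 →
    pvFwdA l l.length i (pvPN l i) = pvLeftB (pvPreB 0 l) l.length 10 := by
  have main : ∀ (m i : Nat), 10 ≤ i + m → i ≤ 10 →
      pvFwdA l l.length i (pvPN l i) = pvLeftB (pvPreB 0 l) l.length 10 := by
    intro m
    induction m with
    | zero =>
      intro i hm hi
      have : i = 10 := by omega
      subst this
      exact pvFwd1_ten l
    | succ m ih =>
      intro i hm hi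
      by_cases h10 : i = 10
      · subst h10; exact pvFwd1_ten l
      · by_cases h : i < l.length
        · rw [pvFwdA_early l l.length i _ h (by omega)]
          have hA := pvPN_succ l i h
          rw [← hA]
          exact ih (i + 1) (by omega) (by omega)
        · rw [pvFwdA_stop _ _ _ _ h, pvLeftB, dif_neg (by omega)]
  intro i hi
  exact main 10 i (by omega) hi

theorem pvBwd2 (l : List Char) : ∀ (i : Int), -1 ≤ i → i ≤ (l.length : Int) - 11 →
    pvBwdA l i ((l.length : Int) - 1 - i).toNat (pvPN l (i + 11).toNat - pvPN l (i + 1).toNat)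
      = pvRightB (pvPreB 0 l) i := by
  have main : ∀ (m : Nat) (i : Int), (i + 1).toNat ≤ m → -1 ≤ i → i ≤ (l.length : Int) - 11 →
      pvBwdA l i ((l.length : Int) - 1 - i).toNat (pvPN l (i + 11).toNat - pvPN l (i + 1).toNat)
        = pvRightB (pvPreB 0 l) i := by
    intro m
    induction m with
    | zero =>
      intro i h1 h2 h3
      rw [pvBwdA_stop _ _ _ _ (by omega), pvRightB, dif_neg (by omega)]
    | succ m ih =>
      intro i h1 h2 h3
      by_cases h : 0 ≤ i
      · have hj : 10 ≤ ((l.length : Int) - 1 - i).toNat := by omega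
        rw [pvBwdA_step l i _ _ h hj, pvRightB, dif_pos h]
        have hiN : i.toNat < l.length := by omega
        have hi10 : (i + 10).toNat < l.length := by omega
        have hA := pvPN_succ l i.toNat hiN
        have e1 : i.toNat + 1 = (i + 1).toNat := by omega
        rw [e1] at hA
        have hB := pvPN_succ l (i + 10).toNat hi10
        have e2 : (i + 10).toNat + 1 = (i + 11).toNat := by omega
        rw [e2] at hB
        have hp1 : (pvPreB 0 l).getD (i + 10).toNat 0 = pvPN l (i + 10).toNat := pvPre_getD0 l _ (by omega)
        have hp0 : (pvPreB 0 l).getD i.toNat 0 = pvPN l i.toNat := pvPre_getD0 l _ (by omega)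
        rw [hp1, hp0]
        have key : pvPN l (i + 11).toNat - pvPN l (i + 1).toNat
            + (if pvIsAT (l.getD i.toNat ' ') then (1:Int) else 0)
            - (if pvIsAT (l.getD (i + 10).toNat ' ') then (1:Int) else 0)
            = pvPN l (i + 10).toNat - pvPN l i.toNat := by
          split_ifs at hA hB ⊢ <;> omega
        rw [key]
        by_cases hc : pvPN l (i + 10).toNat - pvPN l i.toNat < 8
        · rw [if_pos hc, if_pos hc]
        · rw [if_neg hc, if_neg hc]
          have h4 := ih (i - 1) (by omega) (by omega) (by omega)
          have e3 : ((l.length : Int) - 1 - (i - 1)).toNat = ((l.length : Int) - 1 - i).toNat + 1 := by omega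
          have e4 : (i - 1 + 11).toNat = (i + 10).toNat := by omega
          have e5 : (i - 1 + 1).toNat = i.toNat := by omega
          rw [e3, e4, e5] at h4
          exact h4
      · rw [pvBwdA_stop _ _ _ _ h, pvRightB, dif_neg h]
  intro i h2 h3
  exact main (i + 1).toNat i le_rfl h2 h3

theorem pvBwd1 (l : List Char) : ∀ (j : Nat), j ≤ 10 →
    pvBwdA l ((l.length : Int) - 1 - j) j (pvPN l l.length - pvPN l (l.length - j))
      = pvRightB (pvPreB 0 l) ((l.length : Int) - 11) := by
  have ten : pvBwdA l ((l.length : Int) - 1 - (10 : Nat)) 10 (pvPN l l.length - pvPN l (l.length - 10))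
      = pvRightB (pvPreB 0 l) ((l.length : Int) - 11) := by
    by_cases hn : 11 ≤ l.length
    · have h5 := pvBwd2 l ((l.length : Int) - 11) (by omega) (by omega)
      have e1 : ((l.length : Int) - 1 - ((l.length : Int) - 11)).toNat = 10 := by omega
      have e2 : (((l.length : Int) - 11) + 11).toNat = l.length := by omega
      have e3 : (((l.length : Int) - 11) + 1).toNat = l.length - 10 := by omega
      rw [e1, e2, e3] at h5
      have e4 : ((l.length : Int) - 1 - (10 : Nat)) = (l.length : Int) - 11 := by push_cast; ring
      rw [e4]
      exact h5
    · rw [pvBwdA_stop _ _ _ _ (by push_cast; omega), pvRightB, dif_neg (by omega)]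
  have main : ∀ (m j : Nat), 10 ≤ j + m → j ≤ 10 →
      pvBwdA l ((l.length : Int) - 1 - j) j (pvPN l l.length - pvPN l (l.length - j))
        = pvRightB (pvPreB 0 l) ((l.length : Int) - 11) := by
    intro m
    induction m with
    | zero =>
      intro j hm hj
      have : j = 10 := by omega
      subst this
      exact ten
    | succ m ih =>
      intro j hm hj
      by_cases h10 : j = 10
      · subst h10; exact ten
      · by_cases h : 0 ≤ (l.length : Int) - 1 - j
        · rw [pvBwdA_early l _ j _ h (by omega)]
          have hidx : ((l.length : Int) - 1 - (j : Int)).toNat = l.length - 1 - j := by omega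
          have hA := pvPN_succ l (l.length - 1 - j) (by omega)
          have e1 : l.length - 1 - j + 1 = l.length - j := by omega
          rw [e1] at hA
          have key : pvPN l l.length - pvPN l (l.length - j)
              + (if pvIsAT (l.getD ((l.length : Int) - 1 - (j : Int)).toNat ' ') then (1:Int) else 0)
              = pvPN l l.length - pvPN l (l.length - (j + 1)) := by
            rw [hidx]
            have e2 : l.length - (j + 1) = l.length - 1 - j := by omega
            rw [e2]
            split_ifs at hA ⊢ <;> omega
          rw [key]
          have e3 : ((l.length : Int) - 1 - (j : Int)) - 1 = (l.length : Int) - 1 - ((j + 1 : Nat) : Int) := by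
            push_cast; ring
          rw [e3]
          exact ih (j + 1) (by omega) (by omega)
        · rw [pvBwdA_stop _ _ _ _ h, pvRightB, dif_neg (by omega)]
  intro j hj
  exact main 10 j (by omega) hj

-- ===== VERDICT (by name: the statement is the Claim_ definition above) =====
theorem removePolyAT_spec : Claim_equal_removePolyAT := by
  intro seq _
  unfold Spec_removePolyAT removePolyAT removePolyAT_alt
  have hf : pvFwdA seq.toList seq.toList.length 0 0
      = pvLeftB (pvPreB 0 seq.toList) seq.toList.length 10 := by
    have := pvFwd1 seq.toList 0 (by omega)
    simpa [pvPN] using this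
  have hb : pvBwdA seq.toList ((seq.toList.length : Int) - 1) 0 0
      = pvRightB (pvPreB 0 seq.toList) ((seq.toList.length : Int) - 11) := by
    have := pvBwd1 seq.toList 0 (by omega)
    simpa [pvPN] using this
  have e : ((seq.toList.length : Int) - 1 - 10) = ((seq.toList.length : Int) - 11) := by ring
  simp only [e, hf, hb]
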